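-- pv_equiv track=rewrite | github.com/alturkim/dialogue-act-tagging | utils.py | get_utterance_bigrams
-- ===== SOURCE A (Python) =====
-- def get_utterance_bigrams(utterance_tokens_str):
--     word_list = utterance_tokens_str.split()
--     for idx in range(len(word_list)):
--         if idx > 0:
--             bigram = word_list[idx - 1] + ' ' + word_list[idx]
--         else:
--             bigram = '<START>' + ' ' + word_list[idx]
--         yield bigram
-- ===== SOURCE B (Python) =====
-- def get_utterance_bigrams(utterance_tokens_str):
--     def emit(prev, rest):
--         if rest:
--             yield prev + ' ' + rest[0]
--             yield from emit(rest[0], rest[1:])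
--     yield from emit('<START>', utterance_tokens_str.split())
-- ===== Notes on version B (the rewrite author's own statement) =====
-- stated objective: alternative
-- what changed: Replaces A's indexed loop with its idx==0 if/else branch by a recursive generator that carries the previous word as an accumulator seeded with the start sentinel, consuming the word list head-first with no indexing or branching on position.
import Mathlib
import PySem

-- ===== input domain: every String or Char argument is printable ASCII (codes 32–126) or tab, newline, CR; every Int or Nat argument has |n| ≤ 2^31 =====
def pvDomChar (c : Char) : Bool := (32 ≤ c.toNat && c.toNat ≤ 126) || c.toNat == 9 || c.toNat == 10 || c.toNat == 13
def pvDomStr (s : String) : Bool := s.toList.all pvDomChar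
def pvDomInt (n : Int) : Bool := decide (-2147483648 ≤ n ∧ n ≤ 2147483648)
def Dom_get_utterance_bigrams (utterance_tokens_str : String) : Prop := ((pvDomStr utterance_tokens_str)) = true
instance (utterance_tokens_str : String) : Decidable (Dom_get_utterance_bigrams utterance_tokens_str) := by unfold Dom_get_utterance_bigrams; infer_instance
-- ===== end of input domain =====

-- B replaces A's indexed loop with its idx==0 sentinel branch by a recursive generator that
-- carries the previous word as an accumulator seeded with the start sentinel (alternative decomposition, same O(n) cost).

-- ===== PORT A =====
-- A is a Python generator; its port returns the list of yielded values.
-- indices idx and idx-1 are always in range, so pyGetD "" is exact here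
def get_utterance_bigrams (utterance_tokens_str : String) : List String :=
  let word_list := PySem.Str.split₀ utterance_tokens_str
  (PySem.List.pyRange 0 word_list.length 1).foldl
    (fun acc idx =>
      let bigram :=
        if idx > 0 then
          PySem.List.pyGetD word_list (idx - 1) "" ++ " " ++ PySem.List.pyGetD word_list idx ""
        else
          "<START>" ++ " " ++ PySem.List.pyGetD word_list idx ""
      acc ++ [bigram]) []

-- ===== PORT B =====
-- port of Source B's recursive helper 'emit(prev, rest)'
def bigramsEmit (prev : String) (rest : List String) : List String :=
  match rest with
  | [] => []
  | w :: ws => (prev ++ " " ++ w) :: bigramsEmit w ws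

def get_utterance_bigrams_alt (utterance_tokens_str : String) : List String :=
  bigramsEmit "<START>" (PySem.Str.split₀ utterance_tokens_str)

-- ===== PRECONDITION & SPEC =====
def Spec_get_utterance_bigrams (utterance_tokens_str : String) (out : List String) : Prop := out = get_utterance_bigrams_alt utterance_tokens_str
instance (utterance_tokens_str : String) (out : List String) : Decidable (Spec_get_utterance_bigrams utterance_tokens_str out) := by unfold Spec_get_utterance_bigrams; infer_instance

-- ===== CLAIM (what is proved, stated in full; the proofs are below) =====
def Claim_equal_get_utterance_bigrams : Prop := ∀ (utterance_tokens_str : String), Dom_get_utterance_bigrams utterance_tokens_str → Spec_get_utterance_bigrams utterance_tokens_str (get_utterance_bigrams utterance_tokens_str)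

-- ===== LEMMAS AND PROOFS =====

theorem bigramsEmit_eq_zip (prev : String) (wl : List String) :
    bigramsEmit prev wl = ((prev :: wl).zip wl).map (fun pc => pc.1 ++ " " ++ pc.2) := by
  induction wl generalizing prev with
  | nil => rfl
  | cons w ws ih => simp [bigramsEmit, ih w]

theorem bigrams_core (wl : List String) :
    (PySem.List.pyRange 0 wl.length 1).foldl
      (fun acc idx =>
        let bigram :=
          if idx > 0 then
            PySem.List.pyGetD wl (idx - 1) "" ++ " " ++ PySem.List.pyGetD wl idx ""
          else
            "<START>" ++ " " ++ PySem.List.pyGetD wl idx ""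
        acc ++ [bigram]) []
    = (("<START>" :: wl).zip wl).map (fun pc => pc.1 ++ " " ++ pc.2) := by
  rw [PySem.List.foldl_append_singleton_eq_map]
  rw [PySem.List.pyRange_one, List.map_map]
  apply List.ext_getElem
  · simp
  · intro i h1 h2
    simp only [List.nil_append, List.length_map, List.length_range] at h1
    simp only [List.length_map, List.length_zip, List.length_cons] at h2
    have hi : i < wl.length := by omega
    simp only [List.nil_append, List.getElem_map, List.getElem_range, Function.comp_apply,
      List.getElem_zip, zero_add]
    cases i with
    | zero =>
      rw [if_neg (by simp)]
      have hz : PySem.List.pyGetD wl ((0 : Nat) : Int) "" = wl.getD 0 "" :=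
        PySem.List.pyGetD_natCast wl 0 ""
      rw [hz]
      simp [List.getD_eq_getElem?_getD, List.getElem?_eq_getElem hi]
    | succ j =>
      have hj : j < wl.length := by omega
      rw [if_pos (by push_cast; positivity)]
      have e1 : ((j + 1 : Nat) : Int) - 1 = ((j : Nat) : Int) := by push_cast; ring
      rw [e1, PySem.List.pyGetD_natCast wl j "", PySem.List.pyGetD_natCast wl (j+1) ""]
      simp [List.getD_eq_getElem?_getD, List.getElem?_eq_getElem hi, List.getElem?_eq_getElem hj]

-- ===== VERDICT (by name: the statement is the Claim_ definition above) =====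
theorem get_utterance_bigrams_spec : Claim_equal_get_utterance_bigrams := by
  intro s _
  unfold Spec_get_utterance_bigrams get_utterance_bigrams get_utterance_bigrams_alt
  rw [bigramsEmit_eq_zip]
  exact bigrams_core (PySem.Str.split₀ s)
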